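-- pv_equiv track=rewrite | github.com/bootyburglar/DTFBookClub | lesson1/quiz.py | search_cpu_codename
-- ===== SOURCE A (Python) =====
-- def search_cpu_codename(years: list) -> list:
--     cpu_dict={'kaby lake':2015,'ice lake':2016,'comet lake':2017,'alder lake':2018,'whisky lake':2019}
--     output_key=[]
--     for input_year in years:
--         for cpu_key,cpu_value in cpu_dict.items():
--             if input_year ==cpu_value:
--                 output_key.append(cpu_key)
--                 break
--         else:
--             output_key.append(None)
--     return output_key
--
--     pass
-- ===== SOURCE B (Python) =====
-- def search_cpu_codename(years: list) -> list:
--     # The codename years form the consecutive range 2015..2019, so the answer is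
--     # pure arithmetic: index (year - 2015) into the name table, None outside range.
--     names = ['kaby lake', 'ice lake', 'comet lake', 'alder lake', 'whisky lake']
--     return [names[y - 2015] if 2015 <= y <= 2019 else None for y in years]
-- ===== Notes on version B (the rewrite author's own statement) =====
-- stated objective: alternative
-- what changed: Replaces A's per-year scan of the dict items by closed-form arithmetic indexing: since the codename years are the consecutive range 2015..2019, B computes names[y-2015] under a range check, with no dict or scan at all.
import Mathlib
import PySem

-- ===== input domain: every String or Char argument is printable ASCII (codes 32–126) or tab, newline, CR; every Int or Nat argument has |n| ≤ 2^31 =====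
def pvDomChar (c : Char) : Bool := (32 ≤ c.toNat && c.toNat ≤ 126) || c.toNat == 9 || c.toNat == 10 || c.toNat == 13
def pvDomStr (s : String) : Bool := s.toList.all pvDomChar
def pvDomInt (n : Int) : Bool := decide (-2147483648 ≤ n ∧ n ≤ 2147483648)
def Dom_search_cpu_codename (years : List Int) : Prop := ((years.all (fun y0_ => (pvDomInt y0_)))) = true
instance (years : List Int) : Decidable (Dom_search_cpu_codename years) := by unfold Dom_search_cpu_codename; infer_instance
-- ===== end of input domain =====

-- B drops A's per-year scan of the dict items: the codename years are the consecutive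
-- range 2015..2019, so B indexes a name table arithmetically (names[y-2015] under a
-- range check) — an alternative, scan-free formulation with the same output.

-- ===== PORT A =====
-- the literal cpu_dict of A, as its .items() list (insertion order)
def cpuItemsA : List (String × Int) :=
  [("kaby lake", 2015), ("ice lake", 2016), ("comet lake", 2017),
   ("alder lake", 2018), ("whisky lake", 2019)]

-- the inner 'for cpu_key,cpu_value in cpu_dict.items(): … break / else: append None'
def innerScanA (input_year : Int) : List (String × Int) → Option String
  | [] => none
  | (cpu_key, cpu_value) :: rest =>
      if input_year == cpu_value then some cpu_key else innerScanA input_year rest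

def search_cpu_codename (years : List Int) : List (Option String) :=
  years.foldl (fun output_key input_year => output_key ++ [innerScanA input_year cpuItemsA]) []

-- ===== PORT B =====
-- names = ['kaby lake', ...]
def namesB : List String :=
  ["kaby lake", "ice lake", "comet lake", "alder lake", "whisky lake"]

-- [names[y - 2015] if 2015 <= y <= 2019 else None for y in years]
-- (the index y-2015 is in range 0..4 whenever the guard holds, so plain list indexing is exact)
def search_cpu_codename_alt (years : List Int) : List (Option String) :=
  years.map (fun y => if 2015 ≤ y ∧ y ≤ 2019 then namesB[(y - 2015).toNat]? else none)

-- ===== PRECONDITION & SPEC =====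
def Spec_search_cpu_codename (years : List Int) (out : List (Option String)) : Prop := out = search_cpu_codename_alt years
instance (years : List Int) (out : List (Option String)) : Decidable (Spec_search_cpu_codename years out) := by unfold Spec_search_cpu_codename; infer_instance

-- ===== CLAIM (what is proved, stated in full; the proofs are below) =====
def Claim_equal_search_cpu_codename : Prop := ∀ (years : List Int), Dom_search_cpu_codename years → Spec_search_cpu_codename years (search_cpu_codename years)

-- ===== LEMMAS AND PROOFS =====
-- the append-accumulating fold is a map
lemma foldA_eq_map (years : List Int) (acc : List (Option String)) :
    years.foldl (fun output_key input_year => output_key ++ [innerScanA input_year cpuItemsA]) acc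
      = acc ++ years.map (fun y => innerScanA y cpuItemsA) := by
  induction years generalizing acc with
  | nil => simp
  | cons y ys ih => simp [List.foldl, ih]

-- per element, A's inner scan agrees with B's arithmetic indexing
lemma scan_eq_index (y : Int) :
    innerScanA y cpuItemsA
      = (if 2015 ≤ y ∧ y ≤ 2019 then namesB[(y - 2015).toNat]? else none) := by
  by_cases h : 2015 ≤ y ∧ y ≤ 2019
  · obtain ⟨h1, h2⟩ := h
    interval_cases y <;> simp [cpuItemsA, innerScanA, namesB]
  · simp only [if_neg h]
    simp only [cpuItemsA, innerScanA]
    split_ifs with a b c d e <;> simp_all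

-- ===== VERDICT (by name: the statement is the Claim_ definition above) =====
theorem search_cpu_codename_spec : Claim_equal_search_cpu_codename := by
  intro years _
  unfold Spec_search_cpu_codename search_cpu_codename search_cpu_codename_alt
  rw [foldA_eq_map]
  simp [scan_eq_index]
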